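-- pv_equiv track=rewrite | github.com/ryanflavor/hive | src/hive/cli.py | _derive_terminal_name
-- ===== SOURCE A (Python) =====
-- def _derive_terminal_name(seen: set[str]) -> str:
--     suffix = 1
--     candidate = f"term-{suffix}"
--     while candidate in seen:
--         suffix += 1
--         candidate = f"term-{suffix}"
--     seen.add(candidate)
--     return candidate
-- ===== SOURCE B (Python) =====
-- def _derive_terminal_name(seen: set[str]) -> str:
--     bound = len(seen) + 2
--     used = {i for i in range(1, bound) if f"term-{i}" in seen}
--     free = min(set(range(1, bound)) - used)
--     candidate = f"term-{free}"
--     seen.add(candidate)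
--     return candidate
-- ===== Notes on version B (the rewrite author's own statement) =====
-- stated objective: alternative
-- what changed: B collects the set of used suffixes over the bounded range 1..len(seen)+1 in one comprehension and returns term-<min of the complement>, instead of A's open-ended sequential probe-until-free loop.
import Mathlib
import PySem

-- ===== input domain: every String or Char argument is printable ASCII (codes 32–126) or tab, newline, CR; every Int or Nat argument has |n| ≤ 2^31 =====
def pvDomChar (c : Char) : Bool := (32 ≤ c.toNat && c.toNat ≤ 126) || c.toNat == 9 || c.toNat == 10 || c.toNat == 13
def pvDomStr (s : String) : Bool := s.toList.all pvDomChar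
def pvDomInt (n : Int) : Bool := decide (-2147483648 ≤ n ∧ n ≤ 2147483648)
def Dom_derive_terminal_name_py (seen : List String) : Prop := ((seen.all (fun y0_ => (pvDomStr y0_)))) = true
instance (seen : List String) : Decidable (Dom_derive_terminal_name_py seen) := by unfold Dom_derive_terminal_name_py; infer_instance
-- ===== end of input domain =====

-- B replaces A's open-ended probe-until-free loop by one pass collecting the used suffixes
-- over the bounded range 1..len(seen)+1 and taking the min of the complement (objective:
-- alternative). Python A and B both also add the result to the set `seen` in place; the
-- equivalence proved here is about the RETURN value only.

-- ===== PORT A =====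
-- A's while loop, as fuel recursion; fuel seen.length + 1 always suffices (proved below:
-- among the distinct candidates for suffixes 1..len+1 at least one is not in seen).
def pvGoA (seen : List String) : Nat → Int → String
  | 0, suffix => "term-" ++ PySem.Int.toStr suffix
  | fuel+1, suffix =>
    let candidate := "term-" ++ PySem.Int.toStr suffix
    if PySem.Set.contains seen candidate then pvGoA seen fuel (suffix + 1) else candidate

def derive_terminal_name_py (seen : List String) : String :=
  pvGoA seen (seen.length + 1) 1

-- ===== PORT B =====
def derive_terminal_name_py_alt (seen : List String) : String :=
  let bound : Int := PySem.List.len seen + 2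
  let used : PySem.Set Int :=
    PySem.Set.ofList ((PySem.List.pyRange 1 bound 1).filter
      (fun i => PySem.Set.contains seen ("term-" ++ PySem.Int.toStr i)))
  match PySem.List.min? (PySem.Set.diff (PySem.Set.ofList (PySem.List.pyRange 1 bound 1)) used)
      (fun x => x) with
  | some free => "term-" ++ PySem.Int.toStr free
  | none => ""  -- unreachable: the range has more members than seen has strings

-- ===== PRECONDITION & SPEC =====
def Spec_derive_terminal_name_py (seen : List String) (out : String) : Prop := out = derive_terminal_name_py_alt seen
instance (seen : List String) (out : String) : Decidable (Spec_derive_terminal_name_py seen out) := by unfold Spec_derive_terminal_name_py; infer_instance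

-- ===== CLAIM (what is proved, stated in full; the proofs are below) =====
def Claim_equal_derive_terminal_name_py : Prop := ∀ (seen : List String), Dom_derive_terminal_name_py seen → Spec_derive_terminal_name_py seen (derive_terminal_name_py seen)

-- ===== LEMMAS AND PROOFS =====

def pvProbe (seen : List String) (i : Int) : Bool :=
  PySem.Set.contains seen ("term-" ++ PySem.Int.toStr i)

-- the suffix at which A's loop stops, starting from s with the given fuel
def pvFF (seen : List String) : Nat → Int → Int
  | 0, s => s
  | fuel+1, s => if pvProbe seen s then pvFF seen fuel (s + 1) else s

theorem pv_digitChar_inj : ∀ m < 10, ∀ n < 10, Nat.digitChar m = Nat.digitChar n → m = n := by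
  decide

theorem pv_toDigits_inj (m : ℕ) : ∀ n : ℕ, Nat.toDigits 10 m = Nat.toDigits 10 n → m = n := by
  induction m using Nat.strong_induction_on with
  | _ m ih =>
    intro n h
    by_cases hm : m < 10 <;> by_cases hn : n < 10
    · rw [Nat.toDigits_of_lt_base hm, Nat.toDigits_of_lt_base hn] at h
      exact pv_digitChar_inj m hm n hn (by simpa using h)
    · exfalso
      have h1 : (Nat.toDigits 10 m).length ≤ 1 := by
        rw [Nat.toDigits_of_lt_base hm]; simp
      rw [h] at h1
      exact hn ((Nat.length_toDigits_le_iff (b := 10) (k := 1) (by norm_num) (by norm_num)).mp (by simpa using h1))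
    · exfalso
      have h1 : (Nat.toDigits 10 n).length ≤ 1 := by
        rw [Nat.toDigits_of_lt_base hn]; simp
      rw [← h] at h1
      exact hm ((Nat.length_toDigits_le_iff (b := 10) (k := 1) (by norm_num) (by norm_num)).mp (by simpa using h1))
    · rw [Nat.toDigits_eq_if (b := 10) (n := m) (by norm_num),
          Nat.toDigits_eq_if (b := 10) (n := n) (by norm_num)] at h
      rw [if_neg hm, if_neg hn] at h
      have h2 := List.append_inj' h (by simp)
      have hdiv : m / 10 = n / 10 := ih (m / 10) (Nat.div_lt_self (by omega) (by norm_num)) _ h2.1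
      have hmod : m % 10 = n % 10 :=
        pv_digitChar_inj _ (Nat.mod_lt _ (by norm_num)) _ (Nat.mod_lt _ (by norm_num))
          (by simpa using h2.2)
      omega

theorem pv_cand_inj (i j : Int) (hi : 0 ≤ i) (hj : 0 ≤ j)
    (h : "term-" ++ PySem.Int.toStr i = "term-" ++ PySem.Int.toStr j) : i = j := by
  have h1 : "term-".toList ++ (PySem.Int.toStr i).toList
      = "term-".toList ++ (PySem.Int.toStr j).toList := by
    simpa using congrArg String.toList h
  have h2 := List.append_cancel_left h1
  rw [PySem.Int.toList_toStr, PySem.Int.toList_toStr] at h2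
  unfold PySem.Int.toChars at h2
  rw [if_neg (by omega), if_neg (by omega)] at h2
  have := pv_toDigits_inj _ _ h2
  omega

theorem pv_goA_eq (seen : List String) : ∀ (fuel : Nat) (s : Int),
    pvGoA seen fuel s = "term-" ++ PySem.Int.toStr (pvFF seen fuel s) := by
  intro fuel
  induction fuel with
  | zero => intro s; simp [pvGoA, pvFF]
  | succ fuel ih =>
    intro s
    simp only [pvGoA, pvFF, pvProbe]
    split
    · exact ih (s + 1)
    · rfl

theorem pv_foldl_min (t : List Int) : ∀ x : Int, (∀ y ∈ t, x ≤ y) → t.foldl min x = x := by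
  induction t with
  | nil => intro x _; rfl
  | cons y t ih =>
    intro x hx
    simp only [List.foldl_cons]
    rw [min_eq_left (hx y (by simp))]
    exact ih x (fun z hz => hx z (by simp [hz]))

theorem pv_min_head (l : List Int) (hl : l.Pairwise (· < ·)) (hne : l ≠ []) :
    PySem.List.min? l (fun y => y) = l.head? := by
  cases l with
  | nil => exact absurd rfl hne
  | cons x t =>
    rw [PySem.List.min?_id_cons]
    simp only [List.head?_cons]
    rw [pv_foldl_min t x (fun y hy => le_of_lt ((List.pairwise_cons.mp hl).1 y hy))]

theorem pv_foldl_add {α : Type} [BEq α] [LawfulBEq α] (l : List α) :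
    ∀ acc : List α, (acc ++ l).Nodup → l.foldl PySem.Set.add acc = acc ++ l := by
  induction l with
  | nil => intro acc _; simp
  | cons x t ih =>
    intro acc hnd
    have hx : ¬ x ∈ acc := by
      intro hmem
      have := List.Nodup.disjoint (l₁ := acc) (l₂ := x :: t) (by simpa using hnd)
      exact this hmem (by simp)
    simp only [List.foldl_cons, PySem.Set.add, PySem.Set.contains]
    rw [if_neg (by simpa using hx)]
    rw [ih (acc ++ [x]) (by simpa using hnd)]
    simp

theorem pv_ofList_nodup {α : Type} [BEq α] [LawfulBEq α] (l : List α) (h : l.Nodup) :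
    PySem.Set.ofList l = l := by
  rw [PySem.Set.ofList_eq_foldl]
  simpa using pv_foldl_add l [] (by simpa using h)

theorem pv_ff_head (seen : List String) : ∀ (fuel : Nat) (s : Int),
    ((PySem.List.pyRange s (s + fuel) 1).filter (fun i => !pvProbe seen i)) ≠ [] →
    ((PySem.List.pyRange s (s + fuel) 1).filter (fun i => !pvProbe seen i)).head?
      = some (pvFF seen fuel s) := by
  intro fuel
  induction fuel with
  | zero =>
    intro s hne
    exfalso
    apply hne
    rw [PySem.List.pyRange_one_eq_nil (by omega)]
    rfl
  | succ fuel ih =>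
    intro s hne
    have hcons : PySem.List.pyRange s (s + (fuel + 1 : Nat)) 1
        = s :: PySem.List.pyRange (s + 1) ((s + 1) + fuel) 1 := by
      rw [PySem.List.pyRange_one_cons (by push_cast; omega)]
      congr 1
      push_cast
      ring_nf
    rw [hcons] at hne ⊢
    by_cases hp : pvProbe seen s
    · simp only [List.filter_cons, hp, Bool.not_true, Bool.false_eq_true, if_false] at hne ⊢
      rw [ih (s + 1) hne]
      simp [pvFF, hp]
    · simp [hp, pvFF]

theorem pv_free_nonempty (seen : List String) :
    ((PySem.List.pyRange 1 (1 + ((seen.length : Int) + 1)) 1).filter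
      (fun i => !pvProbe seen i)) ≠ [] := by
  intro hempty
  have hall : ∀ i ∈ PySem.List.pyRange 1 (1 + ((seen.length : Int) + 1)) 1,
      pvProbe seen i = true := by
    intro i hi
    have := List.filter_eq_nil_iff.mp hempty i hi
    simpa using this
  set rng := PySem.List.pyRange 1 (1 + ((seen.length : Int) + 1)) 1 with hrng
  have hnd : (rng.map (fun i => "term-" ++ PySem.Int.toStr i)).Nodup := by
    apply (PySem.List.nodup_pyRange_one _ _).map_on
    intro i hi j hj hij
    have hi1 := (PySem.List.mem_pyRange_one.mp hi).1
    have hj1 := (PySem.List.mem_pyRange_one.mp hj).1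
    exact pv_cand_inj i j (by omega) (by omega) hij
  have hsub : (rng.map (fun i => "term-" ++ PySem.Int.toStr i)) ⊆ seen := by
    intro c hc
    obtain ⟨i, hi, rfl⟩ := List.mem_map.mp hc
    have := hall i hi
    simpa [pvProbe, PySem.Set.contains] using this
  have hlen := (hnd.subperm hsub).length_le
  rw [List.length_map, hrng, PySem.List.length_pyRange_one] at hlen
  omega

theorem derive_terminal_name_py_eq (seen : List String) :
    derive_terminal_name_py seen = derive_terminal_name_py_alt seen := by
  unfold derive_terminal_name_py derive_terminal_name_py_alt
  simp only [PySem.List.len_eq]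
  set bound : Int := (seen.length : Int) + 2 with hbound
  set rng := PySem.List.pyRange 1 bound 1 with hrng
  have hbnd : bound = 1 + ((seen.length : Int) + 1) := by omega
  have hndrng : rng.Nodup := PySem.List.nodup_pyRange_one _ _
  -- the built set literals reduce to plain filtered ranges
  have hused : PySem.Set.ofList (rng.filter
      (fun i => PySem.Set.contains seen ("term-" ++ PySem.Int.toStr i)))
      = rng.filter (fun i => pvProbe seen i) := by
    rw [pv_ofList_nodup _ (hndrng.filter _)]
    rfl
  have hofrng : PySem.Set.ofList rng = rng := pv_ofList_nodup _ hndrng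
  rw [hused, hofrng]
  have hdiff : PySem.Set.diff rng (rng.filter (fun i => pvProbe seen i))
      = rng.filter (fun i => !pvProbe seen i) := by
    unfold PySem.Set.diff
    apply List.filter_congr
    intro i hi
    simp only [PySem.Set.contains]
    by_cases hp : pvProbe seen i = true
    · simp [hp, List.mem_filter, hi]
    · simp only [Bool.not_eq_true] at hp
      simp [hp, List.mem_filter]
  rw [hdiff]
  have hne : (rng.filter (fun i => !pvProbe seen i)) ≠ [] := by
    rw [hrng, hbnd]; exact pv_free_nonempty seen
  have hpw : (rng.filter (fun i => !pvProbe seen i)).Pairwise (· < ·) :=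
    (PySem.List.pairwise_lt_pyRange_one _ _).sublist List.filter_sublist
  rw [pv_min_head _ hpw hne]
  have hhead : (rng.filter (fun i => !pvProbe seen i)).head?
      = some (pvFF seen (seen.length + 1) 1) := by
    have := pv_ff_head seen (seen.length + 1) 1 (by
      rw [show (1 : Int) + ((seen.length + 1 : Nat) : Int) = bound by push_cast; omega, ← hrng]
      exact hne)
    rw [show (1 : Int) + ((seen.length + 1 : Nat) : Int) = bound by push_cast; omega, ← hrng] at this
    exact this
  rw [hhead]
  exact pv_goA_eq seen (seen.length + 1) 1

-- ===== VERDICT (by name: the statement is the Claim_ definition above) =====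
theorem derive_terminal_name_py_spec : Claim_equal_derive_terminal_name_py := by
  intro seen _
  unfold Spec_derive_terminal_name_py
  exact derive_terminal_name_py_eq seen
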